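-- pv_equiv track=rewrite | github.com/CodeMasterGohan/Renode_Peripheral_Creater | project/todo_processor.py | _identify_optimizations
-- ===== SOURCE A (Python) =====
-- from typing import Dict, Any, List, Optional, Tuple, Set, Union
-- from collections import defaultdict, OrderedDict
--
-- def _identify_optimizations(todo_list: List[Dict[str, Any]]) -> List[str]:
--     """Identify optimization opportunities."""
--     optimizations = []
--
--     # Parallel task opportunities
--     categories = defaultdict(int)
--     for task in todo_list:
--         categories[task.get("category", "unknown")] += 1
--
--     if categories.get("testing", 0) > 3:
--         optimizations.append("Multiple test tasks can be developed in parallel")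
--
--     # Reusable components
--     register_count = sum(1 for t in todo_list if "register" in t.get("title", "").lower())
--     if register_count > 5:
--         optimizations.append("Consider creating register helper methods for common patterns")
--
--     # Template usage
--     if any("template" in t.get("title", "").lower() for t in todo_list):
--         optimizations.append("Leverage existing Renode templates for faster implementation")
--
--     # Documentation automation
--     if categories.get("documentation", 0) > 0:
--         optimizations.append("Generate documentation from code annotations")
--
--     return optimizations
-- ===== SOURCE B (Python) =====
-- def _identify_optimizations(todo_list):
--     """Identify optimization opportunities (single pass over the task list)."""
--     testing = documentation = register_count = 0
--     has_template = False
--     for task in todo_list: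
--         cat = task.get("category", "unknown")
--         if cat == "testing":
--             testing += 1
--         if cat == "documentation":
--             documentation += 1
--         title = task.get("title", "").lower()
--         if "register" in title:
--             register_count += 1
--         if "template" in title:
--             has_template = True
--     return (
--         (["Multiple test tasks can be developed in parallel"] if testing > 3 else [])
--         + (["Consider creating register helper methods for common patterns"] if register_count > 5 else [])
--         + (["Leverage existing Renode templates for faster implementation"] if has_template else [])
--         + (["Generate documentation from code annotations"] if documentation > 0 else [])
--     )
-- ===== Notes on version B (the rewrite author's own statement) =====
-- stated objective: alternative
-- what changed: Replaces the category defaultdict plus three extra passes (sum-generator, any, two dict lookups) with one loop maintaining four scalar accumulators (testing/documentation counts, register count, template flag) and builds the result by concatenating conditional singleton lists.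
import Mathlib
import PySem

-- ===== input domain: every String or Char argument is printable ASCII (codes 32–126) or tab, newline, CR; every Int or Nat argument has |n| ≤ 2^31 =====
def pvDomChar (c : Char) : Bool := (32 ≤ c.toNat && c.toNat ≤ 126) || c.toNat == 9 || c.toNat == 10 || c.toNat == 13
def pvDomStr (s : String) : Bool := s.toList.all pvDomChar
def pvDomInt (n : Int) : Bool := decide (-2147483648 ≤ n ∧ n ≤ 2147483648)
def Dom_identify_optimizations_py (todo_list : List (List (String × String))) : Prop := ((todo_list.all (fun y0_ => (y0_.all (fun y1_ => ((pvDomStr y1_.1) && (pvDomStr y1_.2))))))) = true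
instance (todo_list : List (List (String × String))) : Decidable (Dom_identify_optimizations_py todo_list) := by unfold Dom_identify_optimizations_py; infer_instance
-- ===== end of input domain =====

-- ===== PORT A =====
-- B replaces A's defaultdict plus separate sum/any passes by one four-accumulator loop (same results).
def identify_optimizations_py (todo_list : List (List (String × String))) : List String :=
  let categories : PySem.Dict String Int :=
    todo_list.foldl (fun d task => d.modify ((PySem.Dict.mk task).getD "category" "unknown") 0 (· + 1)) PySem.Dict.empty
  let optimizations : List String := []
  let optimizations := if categories.getD "testing" 0 > 3 then optimizations ++ ["Multiple test tasks can be developed in parallel"] else optimizations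
  let register_count : Int :=
    todo_list.foldl (fun acc t => if PySem.Str.isIn "register" (PySem.Str.lower ((PySem.Dict.mk t).getD "title" "")) then acc + 1 else acc) 0
  let optimizations := if register_count > 5 then optimizations ++ ["Consider creating register helper methods for common patterns"] else optimizations
  let optimizations := if todo_list.any (fun t => PySem.Str.isIn "template" (PySem.Str.lower ((PySem.Dict.mk t).getD "title" ""))) then optimizations ++ ["Leverage existing Renode templates for faster implementation"] else optimizations
  let optimizations := if categories.getD "documentation" 0 > 0 then optimizations ++ ["Generate documentation from code annotations"] else optimizations
  optimizations

-- ===== PORT B =====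
def identify_optimizations_py_alt (todo_list : List (List (String × String))) : List String :=
  let s : Int × Int × Int × Bool :=
    todo_list.foldl (fun (s : Int × Int × Int × Bool) task =>
      let cat := (PySem.Dict.mk task).getD "category" "unknown"
      let title := PySem.Str.lower ((PySem.Dict.mk task).getD "title" "")
      ( s.1 + (if cat = "testing" then 1 else 0),
        s.2.1 + (if cat = "documentation" then 1 else 0),
        s.2.2.1 + (if PySem.Str.isIn "register" title then 1 else 0),
        s.2.2.2 || PySem.Str.isIn "template" title )) (0, 0, 0, false)
  (if s.1 > 3 then ["Multiple test tasks can be developed in parallel"] else [])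
    ++ (if s.2.2.1 > 5 then ["Consider creating register helper methods for common patterns"] else [])
    ++ (if s.2.2.2 then ["Leverage existing Renode templates for faster implementation"] else [])
    ++ (if s.2.1 > 0 then ["Generate documentation from code annotations"] else [])

-- ===== PRECONDITION & SPEC =====
def Spec_identify_optimizations_py (todo_list : List (List (String × String))) (out : List String) : Prop := out = identify_optimizations_py_alt todo_list
instance (todo_list : List (List (String × String))) (out : List String) : Decidable (Spec_identify_optimizations_py todo_list out) := by unfold Spec_identify_optimizations_py; infer_instance

-- ===== CLAIM (what is proved, stated in full; the proofs are below) =====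
def Claim_equal_identify_optimizations_py : Prop := ∀ (todo_list : List (List (String × String))), Dom_identify_optimizations_py todo_list → Spec_identify_optimizations_py todo_list (identify_optimizations_py todo_list)

-- ===== LEMMAS AND PROOFS =====

-- B's single fold, component-wise (induction generalizing the accumulator).
theorem pv_fold4 (l : List (List (String × String))) (s : Int × Int × Int × Bool) :
    l.foldl (fun (s : Int × Int × Int × Bool) task =>
      let cat := (PySem.Dict.mk task).getD "category" "unknown"
      let title := PySem.Str.lower ((PySem.Dict.mk task).getD "title" "")
      ( s.1 + (if cat = "testing" then 1 else 0),
        s.2.1 + (if cat = "documentation" then 1 else 0),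
        s.2.2.1 + (if PySem.Str.isIn "register" title then 1 else 0),
        s.2.2.2 || PySem.Str.isIn "template" title )) s
    = ( s.1 + (l.countP (fun t => (PySem.Dict.mk t).getD "category" "unknown" == "testing") : Int),
        s.2.1 + (l.countP (fun t => (PySem.Dict.mk t).getD "category" "unknown" == "documentation") : Int),
        s.2.2.1 + (l.countP (fun t => PySem.Str.isIn "register" (PySem.Str.lower ((PySem.Dict.mk t).getD "title" ""))) : Int),
        s.2.2.2 || l.any (fun t => PySem.Str.isIn "template" (PySem.Str.lower ((PySem.Dict.mk t).getD "title" "")))) := by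
  induction l generalizing s with
  | nil => simp
  | cons h t ih =>
      simp only [List.foldl_cons, ih, List.countP_cons, List.any_cons, beq_iff_eq]
      obtain ⟨a, b, c, d⟩ := s
      simp only [Prod.mk.injEq]
      refine ⟨?_, ?_, ?_, ?_⟩ <;> first
        | (split_ifs <;> push_cast <;> omega)
        | (cases d <;> simp)

-- A's category dict lookups are countP over the list.
theorem pv_cat (l : List (List (String × String))) (k : String) :
    (l.foldl (fun d task => d.modify ((PySem.Dict.mk task).getD "category" "unknown") 0 (· + 1)) PySem.Dict.empty).getD k 0
      = (l.countP (fun t => (PySem.Dict.mk t).getD "category" "unknown" == k) : Int) := by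
  have h : ∀ d : PySem.Dict String Int,
      (l.foldl (fun d task => d.modify ((PySem.Dict.mk task).getD "category" "unknown") 0 (· + 1)) d).getD k 0
        = d.getD k 0 + (l.countP (fun t => (PySem.Dict.mk t).getD "category" "unknown" == k) : Int) := by
    induction l with
    | nil => simp
    | cons hd tl ih =>
        intro d
        simp only [List.foldl_cons, ih, List.countP_cons, beq_iff_eq, PySem.Dict.getD_modify]
        split_ifs with h1 h2 h2
        · subst h1; omega
        · exact absurd h1.symm h2
        · exact absurd h2.symm h1
        · omega
  simpa using h PySem.Dict.empty

-- A's register-count fold is countP.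
theorem pv_reg (l : List (List (String × String))) :
    l.foldl (fun acc t => if PySem.Str.isIn "register" (PySem.Str.lower ((PySem.Dict.mk t).getD "title" "")) then acc + 1 else acc) (0 : Int)
      = (l.countP (fun t => PySem.Str.isIn "register" (PySem.Str.lower ((PySem.Dict.mk t).getD "title" ""))) : Int) := by
  have h : ∀ (s : Int), l.foldl (fun acc t => if PySem.Str.isIn "register" (PySem.Str.lower ((PySem.Dict.mk t).getD "title" "")) then acc + 1 else acc) s
      = s + (l.countP (fun t => PySem.Str.isIn "register" (PySem.Str.lower ((PySem.Dict.mk t).getD "title" ""))) : Int) := by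
    induction l with
    | nil => simp
    | cons h t ih =>
        intro s
        simp only [List.foldl_cons, ih, List.countP_cons]
        split_ifs <;> push_cast <;> omega
  simpa using h 0

-- ===== VERDICT (by name: the statement is the Claim_ definition above) =====
theorem identify_optimizations_py_spec : Claim_equal_identify_optimizations_py := by
  intro todo_list _
  unfold Spec_identify_optimizations_py identify_optimizations_py identify_optimizations_py_alt
  simp only [pv_fold4, pv_cat, pv_reg, zero_add, Bool.false_or]
  split_ifs <;> simp_all
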